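-- pv_equiv track=rewrite | github.com/TylerGarlick/abraxas | skills/creative/image-gen/generate.py | simplify_prompt
-- ===== SOURCE A (Python) =====
-- def simplify_prompt(prompt: str) -> str:
--     """Simplify prompt for retry - remove complex descriptors."""
--     # Remove common problematic phrases
--     simplifications = [
--         ('professional photography', ''),
--         ('dramatic lighting', 'soft lighting'),
--         ('cinematic', ''),
--         ('sultry', 'confident'),
--         ('seductive', 'elegant'),
--         ('intimate', ''),
--         ('golden hour', 'bright day'),
--     ]
--
--     simplified = prompt
--     for find, replace in simplifications:
--         simplified = simplified.replace(find, replace)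
--
--     # Remove extra spaces
--     simplified = ' '.join(simplified.split())
--
--     return simplified
-- ===== SOURCE B (Python) =====
-- def simplify_prompt(prompt: str) -> str:
--     """Simplify prompt for retry - remove complex descriptors."""
--     def apply(s, rules):
--         if not rules:
--             return s
--         find, replace = rules[0]
--         # replacing every occurrence = split on the phrase, rejoin with its replacement
--         return apply(replace.join(s.split(find)), rules[1:])
--
--     simplified = apply(prompt, [
--         ('professional photography', ''),
--         ('dramatic lighting', 'soft lighting'),
--         ('cinematic', ''),
--         ('sultry', 'confident'),
--         ('seductive', 'elegant'),
--         ('intimate', ''),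
--         ('golden hour', 'bright day'),
--     ])
--     return ' '.join(simplified.split())
-- ===== Notes on version B (the rewrite author's own statement) =====
-- stated objective: alternative
-- what changed: Each phrase rewrite is done by splitting the string on the phrase and interpolating the replacement between the pieces, with the rule table consumed by recursion instead of a loop of str.replace scans; the final whitespace normalization is unchanged.
import Mathlib
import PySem

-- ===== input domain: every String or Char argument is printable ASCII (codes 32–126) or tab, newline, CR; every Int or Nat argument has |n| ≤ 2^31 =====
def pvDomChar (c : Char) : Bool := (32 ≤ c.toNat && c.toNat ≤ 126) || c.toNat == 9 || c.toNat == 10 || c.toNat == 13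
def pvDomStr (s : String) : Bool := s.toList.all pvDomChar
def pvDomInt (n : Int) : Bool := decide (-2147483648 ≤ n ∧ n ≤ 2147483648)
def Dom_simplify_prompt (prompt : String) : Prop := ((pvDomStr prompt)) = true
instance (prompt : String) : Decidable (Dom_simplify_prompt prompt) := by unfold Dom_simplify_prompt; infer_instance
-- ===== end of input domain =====

-- B replaces each phrase by splitting on it and interpolating the replacement (recursion over the
-- rule table) instead of A's loop of str.replace scans; same return value, no claim beyond that.

-- ===== PORT A =====
def simplify_prompt (prompt : String) : String :=
  let simplifications : List (String × String) :=
    [("professional photography", ""),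
     ("dramatic lighting", "soft lighting"),
     ("cinematic", ""),
     ("sultry", "confident"),
     ("seductive", "elegant"),
     ("intimate", ""),
     ("golden hour", "bright day")]
  let simplified := simplifications.foldl (fun s p => PySem.Str.replace s p.1 p.2) prompt
  PySem.Str.join " " (PySem.Str.split₀ simplified)

-- ===== PORT B =====
-- Source B's recursive `apply`: split on the phrase, rejoin with its replacement.
-- PySem.Chars.splitOn is exactly Python's s.split(sep) for nonempty sep; every rule phrase is nonempty.
def sp_apply : String → List (String × String) → String
  | s, [] => s
  | s, (f, r) :: rest =>
      sp_apply (PySem.Str.join r (List.map String.ofList (PySem.Chars.splitOn s.toList f.toList))) rest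

def simplify_prompt_alt (prompt : String) : String :=
  let simplified := sp_apply prompt
    [("professional photography", ""),
     ("dramatic lighting", "soft lighting"),
     ("cinematic", ""),
     ("sultry", "confident"),
     ("seductive", "elegant"),
     ("intimate", ""),
     ("golden hour", "bright day")]
  PySem.Str.join " " (PySem.Str.split₀ simplified)

-- ===== PRECONDITION & SPEC =====
def Spec_simplify_prompt (prompt : String) (out : String) : Prop := out = simplify_prompt_alt prompt
instance (prompt : String) (out : String) : Decidable (Spec_simplify_prompt prompt out) := by unfold Spec_simplify_prompt; infer_instance

-- ===== CLAIM (what is proved, stated in full; the proofs are below) =====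
def Claim_equal_simplify_prompt : Prop := ∀ (prompt : String), Dom_simplify_prompt prompt → Spec_simplify_prompt prompt (simplify_prompt prompt)

-- ===== LEMMAS AND PROOFS =====

-- replace.go's accumulator is a reversed prefix of the output
theorem sp_replace_go_acc (sep new : List Char) :
    ∀ (fuel : Nat) (l acc : List Char),
      PySem.Chars.replace.go sep new fuel l acc
        = acc.reverse ++ PySem.Chars.replace.go sep new fuel l [] := by
  intro fuel
  induction fuel with
  | zero => intro l acc; simp [PySem.Chars.replace.go]
  | succ n ih =>
      intro l acc
      cases l with
      | nil => simp [PySem.Chars.replace.go]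
      | cons c t =>
          by_cases h : sep.isPrefixOf (c :: t) = true
          · simp only [PySem.Chars.replace.go, h, if_pos]
            rw [ih _ (new.reverse ++ acc), ih _ (new.reverse ++ [])]
            simp
          · simp only [PySem.Chars.replace.go, h, if_neg, Bool.false_eq_true, not_false_iff]
            rw [ih t (c :: acc), ih t (c :: [])]
            simp

-- splitOn.go's accumulator is a reversed prefix of the output pieces
theorem sp_split_go_acc (sep : List Char) :
    ∀ (fuel : Nat) (l cur : List Char) (acc : List (List Char)),
      PySem.Chars.splitOn.go sep fuel l cur acc
        = acc.reverse ++ PySem.Chars.splitOn.go sep fuel l cur [] := by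
  intro fuel
  induction fuel with
  | zero => intro l cur acc; simp [PySem.Chars.splitOn.go]
  | succ n ih =>
      intro l cur acc
      cases l with
      | nil => simp [PySem.Chars.splitOn.go]
      | cons c t =>
          by_cases h : sep.isPrefixOf (c :: t) = true
          · simp only [PySem.Chars.splitOn.go, h, if_pos]
            rw [ih _ [] (cur.reverse :: acc), ih _ [] (cur.reverse :: [])]
            simp
          · simp only [PySem.Chars.splitOn.go, h, if_neg, Bool.false_eq_true, not_false_iff]
            exact ih t (c :: cur) acc

-- splitOn.go never returns the empty list of pieces
theorem sp_split_go_ne (sep : List Char) :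
    ∀ (fuel : Nat) (l cur : List Char),
      PySem.Chars.splitOn.go sep fuel l cur [] ≠ [] := by
  intro fuel
  induction fuel with
  | zero => intro l cur; simp [PySem.Chars.splitOn.go]
  | succ n ih =>
      intro l cur
      cases l with
      | nil => simp [PySem.Chars.splitOn.go]
      | cons c t =>
          by_cases h : sep.isPrefixOf (c :: t) = true
          · simp only [PySem.Chars.splitOn.go, h, if_pos]
            rw [sp_split_go_acc]
            simp
          · simp only [PySem.Chars.splitOn.go, h, if_neg, Bool.false_eq_true, not_false_iff]
            exact ih t (c :: cur)

-- glue a prefix onto the first piece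
def sp_consFirst (x : List Char) : List (List Char) → List (List Char)
  | [] => [x]
  | p :: ps => (x ++ p) :: ps

-- splitOn.go's `cur` argument is glued onto the front of the first piece
theorem sp_split_go_cur (sep : List Char) :
    ∀ (fuel : Nat) (l cur : List Char),
      PySem.Chars.splitOn.go sep fuel l cur []
        = sp_consFirst cur.reverse (PySem.Chars.splitOn.go sep fuel l [] []) := by
  intro fuel
  induction fuel with
  | zero => intro l cur; simp [PySem.Chars.splitOn.go, sp_consFirst]
  | succ n ih =>
      intro l cur
      cases l with
      | nil => simp [PySem.Chars.splitOn.go, sp_consFirst]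
      | cons c t =>
          by_cases h : sep.isPrefixOf (c :: t) = true
          · simp only [PySem.Chars.splitOn.go, h, if_pos]
            rw [sp_split_go_acc _ _ _ [] [cur.reverse], sp_split_go_acc _ _ _ [] [[].reverse]]
            simp [sp_consFirst]
          · simp only [PySem.Chars.splitOn.go, h, if_neg, Bool.false_eq_true, not_false_iff]
            rw [ih t (c :: cur), ih t (c :: [])]
            cases hx : PySem.Chars.splitOn.go sep n t [] [] with
            | nil => exact absurd hx (sp_split_go_ne sep n t [])
            | cons p ps => simp [sp_consFirst]

-- join over a glued-on first piece
theorem sp_join_consFirst (new x : List Char) (l : List (List Char)) (hl : l ≠ []) :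
    PySem.Chars.join new (sp_consFirst x l) = x ++ PySem.Chars.join new l := by
  cases l with
  | nil => exact absurd rfl hl
  | cons p ps =>
      cases ps with
      | nil => simp [sp_consFirst, PySem.Chars.join_singleton]
      | cons q qs => simp [sp_consFirst, PySem.Chars.join_cons_cons]

-- MAIN: fuelled replace = join of the fuelled split, for nonempty sep
theorem sp_main (sep new : List Char) (hsep : sep ≠ []) :
    ∀ (fuel : Nat) (l : List Char), l.length ≤ fuel →
      PySem.Chars.replace.go sep new fuel l []
        = PySem.Chars.join new (PySem.Chars.splitOn.go sep (fuel + 1) l [] []) := by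
  intro fuel
  induction fuel with
  | zero =>
      intro l hl
      have : l = [] := List.length_eq_zero_iff.mp (Nat.le_zero.mp hl)
      subst this
      simp [PySem.Chars.replace.go, PySem.Chars.splitOn.go, PySem.Chars.join_singleton]
  | succ n ih =>
      intro l hl
      cases l with
      | nil =>
          simp [PySem.Chars.replace.go, PySem.Chars.splitOn.go, PySem.Chars.join_singleton]
      | cons c t =>
          have hsl : 0 < sep.length := List.length_pos_iff.mpr hsep
          by_cases h : sep.isPrefixOf (c :: t) = true
          · have hdrop : (List.drop sep.length (c :: t)).length ≤ n := by
              simp only [List.length_drop, List.length_cons] at *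
              omega
            simp only [PySem.Chars.replace.go, PySem.Chars.splitOn.go, h, if_pos]
            rw [sp_replace_go_acc, sp_split_go_acc _ _ _ [] [[].reverse]]
            rw [ih _ hdrop]
            cases hx : PySem.Chars.splitOn.go sep (n + 1) (List.drop sep.length (c :: t)) [] [] with
            | nil => exact absurd hx (sp_split_go_ne sep (n + 1) _ [])
            | cons p ps => simp [PySem.Chars.join_cons_cons]
          · have ht : t.length ≤ n := by
              simp only [List.length_cons] at hl; omega
            simp only [PySem.Chars.replace.go, PySem.Chars.splitOn.go, h, if_neg,
              Bool.false_eq_true, not_false_iff]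
            rw [sp_replace_go_acc, sp_split_go_cur, ih t ht]
            cases hx : PySem.Chars.splitOn.go sep (n + 1) t [] [] with
            | nil => exact absurd hx (sp_split_go_ne sep (n + 1) t [])
            | cons p ps =>
                rw [sp_join_consFirst _ _ _ (by simp)]

-- Python identity: s.replace(f, r) = r.join(s.split(f)) for nonempty f
theorem sp_replace_eq_join_splitOn (s sep new : List Char) (hsep : sep ≠ []) :
    PySem.Chars.replace s sep new = PySem.Chars.join new (PySem.Chars.splitOn s sep) := by
  have : sep.isEmpty = false := by simp [hsep]
  simp only [PySem.Chars.replace, PySem.Chars.splitOn, this, Bool.false_eq_true, if_neg,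
    not_false_iff]
  exact sp_main sep new hsep s.length s le_rfl

-- one fold step of A = one recursion step of B
theorem sp_step (s f r : String) (hf : f.toList ≠ []) :
    PySem.Str.replace s f r
      = PySem.Str.join r (List.map String.ofList (PySem.Chars.splitOn s.toList f.toList)) := by
  apply String.toList_injective
  rw [PySem.Str.toList_replace, PySem.Str.toList_join,
      sp_replace_eq_join_splitOn _ _ _ hf]
  congr 1
  simp only [List.map_map, Function.comp_def, String.toList_ofList, List.map_id']

-- the whole chain
theorem sp_chain (rules : List (String × String)) :
    ∀ (s : String), (∀ p ∈ rules, p.1.toList ≠ []) →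
      rules.foldl (fun s p => PySem.Str.replace s p.1 p.2) s = sp_apply s rules := by
  induction rules with
  | nil => intro s _; rfl
  | cons hd tl ih =>
      intro s hall
      obtain ⟨f, r⟩ := hd
      simp only [List.foldl_cons, sp_apply]
      rw [sp_step s f r (hall (f, r) (by simp))]
      exact ih _ (fun p hp => hall p (List.mem_cons_of_mem _ hp))

-- ===== VERDICT (by name: the statement is the Claim_ definition above) =====
theorem simplify_prompt_spec : Claim_equal_simplify_prompt := by
  intro prompt _
  show simplify_prompt prompt = simplify_prompt_alt prompt
  simp only [simplify_prompt, simplify_prompt_alt]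
  rw [sp_chain _ prompt (by decide)]
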